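-- pv_equiv track=rewrite | github.com/shu-shu-1/Little-Tree-Clock | plugins_ext/study_schedule/models.py | normalize_weekdays
-- ===== SOURCE A (Python) =====
-- from typing import Any, Dict, List
--
-- def normalize_weekdays(values: List[int]) -> List[int]:
--     result = []
--     seen: set[int] = set()
--     for value in values:
--         try:
--             day = int(value)
--         except (TypeError, ValueError):
--             continue
--         if 0 <= day <= 6 and day not in seen:
--             seen.add(day)
--             result.append(day)
--     return sorted(result)
-- ===== SOURCE B (Python) =====
-- def normalize_weekdays(values):
--     present = [False] * 7
--     for value in values:
--         try:
--             day = int(value)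
--         except (TypeError, ValueError):
--             continue
--         if 0 <= day <= 6:
--             present[day] = True
--     return [d for d in range(7) if present[d]]
-- ===== Notes on version B (the rewrite author's own statement) =====
-- stated objective: alternative
-- what changed: Replaces the seen-set dedup plus final comparison sort with a fixed 7-slot boolean presence array filled in one pass and read back by scanning range(7), so no set and no sort.
import Mathlib
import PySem

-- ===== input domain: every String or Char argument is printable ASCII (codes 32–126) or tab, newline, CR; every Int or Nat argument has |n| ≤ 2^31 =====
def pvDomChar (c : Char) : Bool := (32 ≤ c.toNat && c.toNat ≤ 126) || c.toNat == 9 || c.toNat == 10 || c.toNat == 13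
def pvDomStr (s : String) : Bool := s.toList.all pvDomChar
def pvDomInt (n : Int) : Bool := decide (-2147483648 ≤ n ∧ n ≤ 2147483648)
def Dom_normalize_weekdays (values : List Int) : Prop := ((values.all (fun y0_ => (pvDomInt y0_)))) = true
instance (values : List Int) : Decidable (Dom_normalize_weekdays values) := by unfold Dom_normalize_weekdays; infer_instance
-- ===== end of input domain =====

-- B replaces A's seen-set dedup and final comparison sort with a 7-slot boolean
-- presence array read back by a scan over range(7) (objective: alternative).
-- On List Int inputs int(value) never raises, so the try/except is a no-op in both ports.

-- ===== PORT A =====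
-- loop body of A: try int(value); if 0 <= day <= 6 and day not in seen: seen.add; result.append
def nwAStep (st : List Int × PySem.Set Int) (value : Int) : List Int × PySem.Set Int :=
  let day := value
  if 0 ≤ day ∧ day ≤ 6 ∧ day ∉ st.2 then (st.1 ++ [day], PySem.Set.add st.2 day) else st

def normalize_weekdays (values : List Int) : List Int :=
  let st := values.foldl nwAStep ([], PySem.Set.empty)
  PySem.List.sorted st.1 (fun x => x) false

-- ===== PORT B =====
-- loop body of B: try int(value); if 0 <= day <= 6: present[day] = True
def nwBStep (p : List Bool) (value : Int) : List Bool :=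
  let day := value
  if 0 ≤ day ∧ day ≤ 6 then PySem.List.pySetD p day true else p

def normalize_weekdays_alt (values : List Int) : List Int :=
  let present := values.foldl nwBStep (List.replicate 7 false)
  (PySem.List.pyRange 0 7 1).filter (fun d => (PySem.List.pyGet? present d).getD false)

-- ===== PRECONDITION & SPEC =====
def Spec_normalize_weekdays (values : List Int) (out : List Int) : Prop := out = normalize_weekdays_alt values
instance (values : List Int) (out : List Int) : Decidable (Spec_normalize_weekdays values out) := by unfold Spec_normalize_weekdays; infer_instance

-- ===== CLAIM (what is proved, stated in full; the proofs are below) =====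
def Claim_equal_normalize_weekdays : Prop := ∀ (values : List Int), Dom_normalize_weekdays values → Spec_normalize_weekdays values (normalize_weekdays values)

-- ===== LEMMAS AND PROOFS =====

-- A's loop: result stays duplicate-free and collects exactly the in-range values seen so far.
lemma nwA_invariant (vs : List Int) : ∀ (r : List Int) (s : PySem.Set Int),
    (∀ x, x ∈ s ↔ x ∈ r) → r.Nodup →
    (vs.foldl nwAStep (r, s)).1.Nodup ∧
      (∀ x, x ∈ (vs.foldl nwAStep (r, s)).1 ↔ x ∈ r ∨ (x ∈ vs ∧ 0 ≤ x ∧ x ≤ 6)) := by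
  induction vs with
  | nil => intro r s hs hn; simpa using hn
  | cons v vs ih =>
    intro r s hs hn
    simp only [List.foldl_cons]
    by_cases hc : 0 ≤ v ∧ v ≤ 6 ∧ v ∉ s
    · have hstep : nwAStep (r, s) v = (r ++ [v], PySem.Set.add s v) := by
        simp [nwAStep, hc]
      rw [hstep]
      have hvr : v ∉ r := fun h => hc.2.2 ((hs v).mpr h)
      have hs' : ∀ x, x ∈ PySem.Set.add s v ↔ x ∈ r ++ [v] := by
        intro x
        rw [PySem.Set.mem_add]
        simp [hs x]
      have hn' : (r ++ [v]).Nodup := by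
        have hcons : (v :: r).Nodup := List.nodup_cons.mpr ⟨hvr, hn⟩
        first
          | exact (List.perm_append_singleton v r).nodup hcons
          | exact (List.perm_append_singleton v r).symm.nodup hcons
      obtain ⟨h1, h2⟩ := ih (r ++ [v]) (PySem.Set.add s v) hs' hn'
      refine ⟨h1, fun x => ?_⟩
      rw [h2 x]
      simp only [List.mem_append, List.mem_cons, List.not_mem_nil, or_false]
      constructor
      · rintro ((h | rfl) | ⟨h, h0, h6⟩)
        · exact Or.inl h
        · exact Or.inr ⟨Or.inl rfl, hc.1, hc.2.1⟩
        · exact Or.inr ⟨Or.inr h, h0, h6⟩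
      · rintro (h | ⟨(rfl | h), h0, h6⟩)
        · exact Or.inl (Or.inl h)
        · exact Or.inl (Or.inr rfl)
        · exact Or.inr ⟨h, h0, h6⟩
    · have hstep : nwAStep (r, s) v = (r, s) := by
        simp only [nwAStep]
        rw [if_neg hc]
      rw [hstep]
      obtain ⟨h1, h2⟩ := ih r s hs hn
      refine ⟨h1, fun x => ?_⟩
      rw [h2 x]
      constructor
      · rintro (h | ⟨h, h0, h6⟩)
        · exact Or.inl h
        · exact Or.inr ⟨List.mem_cons_of_mem _ h, h0, h6⟩
      · rintro (h | ⟨h, h0, h6⟩)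
        · exact Or.inl h
        · rcases List.mem_cons.mp h with rfl | h
          · -- v itself in range: it is already in s, hence in r
            left; exact (hs x).mp (by_contra fun hns => hc ⟨h0, h6, hns⟩)
          · exact Or.inr ⟨h, h0, h6⟩

-- B's loop: length stays 7 and slot d records whether some in-range value equal to d occurred.
lemma nwB_invariant (vs : List Int) : ∀ (p : List Bool), p.length = 7 →
    (vs.foldl nwBStep p).length = 7 ∧
      (∀ d : Nat, d < 7 →
        (vs.foldl nwBStep p).getD d false = (p.getD d false || decide ((d : Int) ∈ vs))) := by
  induction vs with
  | nil =>
    intro p hp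
    refine ⟨hp, fun d hd => ?_⟩
    simp
  | cons v vs ih =>
    intro p hp
    simp only [List.foldl_cons]
    by_cases hc : 0 ≤ v ∧ v ≤ 6
    · have hset : nwBStep p v = p.set v.toNat true := by
        simp only [nwBStep]
        rw [if_pos hc, PySem.List.pySetD_of_nonneg p true hc.1]
      rw [hset]
      obtain ⟨h1, h2⟩ := ih (p.set v.toNat true) (by rw [List.length_set]; exact hp)
      refine ⟨h1, fun d hd => ?_⟩
      rw [h2 d hd]
      by_cases hdv : (d : Int) = v
      · have hdt : v.toNat = d := by omega
        have hx : (p.set v.toNat true).getD d false = true := by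
          rw [List.getD_eq_getElem?_getD, ← hdt, List.getElem?_set_self (by omega)]
          rfl
        have hmem : decide ((d : Int) ∈ v :: vs) = true := by
          simp [List.mem_cons, hdv]
        rw [hx, hmem]
        simp
      · have hne : v.toNat ≠ d := by omega
        have hx : (p.set v.toNat true).getD d false = p.getD d false := by
          rw [List.getD_eq_getElem?_getD, List.getElem?_set_ne hne, ← List.getD_eq_getElem?_getD]
        have hmem : decide ((d : Int) ∈ v :: vs) = decide ((d : Int) ∈ vs) := by
          simp [List.mem_cons, hdv]
        rw [hx, hmem]
    · have hstep : nwBStep p v = p := by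
        simp only [nwBStep]
        rw [if_neg hc]
      rw [hstep]
      obtain ⟨h1, h2⟩ := ih p hp
      refine ⟨h1, fun d hd => ?_⟩
      rw [h2 d hd]
      have hdv : (d : Int) ≠ v := by omega
      have hmem : decide ((d : Int) ∈ v :: vs) = decide ((d : Int) ∈ vs) := by
        simp [List.mem_cons, hdv]
      rw [hmem]

-- B's output characterized: the in-range members of values, in increasing order.
lemma nwB_eq_filter (values : List Int) :
    normalize_weekdays_alt values
      = (PySem.List.pyRange 0 7 1).filter (fun d => decide (d ∈ values)) := by
  unfold normalize_weekdays_alt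
  obtain ⟨hlen, hget⟩ := nwB_invariant values (List.replicate 7 false) (by simp)
  apply List.filter_congr
  intro d hd
  have hd' := (PySem.List.mem_pyRange_one).mp hd
  have h0 : 0 ≤ d := hd'.1
  have h7 : d < 7 := hd'.2
  have hdn : d.toNat < 7 := by omega
  have hdn' : d.toNat < (values.foldl nwBStep (List.replicate 7 false)).length := by
    rw [hlen]; exact hdn
  have hsome : PySem.List.pyGet? (values.foldl nwBStep (List.replicate 7 false)) d
      = some ((values.foldl nwBStep (List.replicate 7 false)).getD d.toNat false) := by
    have hlt : d < ((values.foldl nwBStep (List.replicate 7 false)).length : Int) := by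
      rw [hlen]; exact_mod_cast h7
    rw [PySem.List.pyGet?_of_nonneg_of_lt _ h0 hlt, List.getElem?_eq_getElem hdn',
      List.getD_eq_getElem?_getD, List.getElem?_eq_getElem hdn', Option.getD_some]
  rw [hsome]
  have hcast : ((d.toNat : Int)) = d := by omega
  rw [Option.getD_some, hget d.toNat hdn, hcast]
  have hrep : (List.replicate 7 false).getD d.toNat false = false := by
    rw [List.getD_eq_getElem?_getD, List.getElem?_replicate]
    split <;> rfl
  rw [hrep, Bool.false_or]

theorem normalize_weekdays_spec_aux (values : List Int) :
    normalize_weekdays values = normalize_weekdays_alt values := by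
  rw [nwB_eq_filter]
  unfold normalize_weekdays
  obtain ⟨hnd, hmem⟩ := nwA_invariant values [] PySem.Set.empty (by simp [PySem.Set.empty]) List.nodup_nil
  set r := (values.foldl nwAStep ([], PySem.Set.empty)).1 with hr
  set ys := (PySem.List.pyRange 0 7 1).filter (fun d => decide (d ∈ values)) with hys
  have hysnd : ys.Nodup := (PySem.List.nodup_pyRange_one 0 7).filter _
  have hyslt : ys.Pairwise (· < ·) := (PySem.List.pairwise_lt_pyRange_one 0 7).filter _
  have hmem' : ∀ x, x ∈ ys ↔ x ∈ r := by
    intro x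
    rw [hys, List.mem_filter, PySem.List.mem_pyRange_one, hmem x]
    simp only [List.not_mem_nil, false_or, decide_eq_true_eq]
    constructor
    · rintro ⟨⟨h0, h7⟩, hv⟩; exact ⟨hv, h0, by omega⟩
    · rintro ⟨hv, h0, h6⟩; exact ⟨⟨h0, by omega⟩, hv⟩
  have hperm : ys.Perm r := (List.perm_ext_iff_of_nodup hysnd hnd).mpr hmem'
  exact PySem.List.sorted_id_eq_of_perm_of_pairwise _ _ hperm (hyslt.imp le_of_lt)

-- ===== VERDICT (by name: the statement is the Claim_ definition above) =====
theorem normalize_weekdays_spec : Claim_equal_normalize_weekdays := by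
  intro values _
  unfold Spec_normalize_weekdays
  exact normalize_weekdays_spec_aux values
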